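-- pv_equiv track=rewrite | github.com/davidcv5/foobar | when_it_rains_it_pours.py | reduce_peaks
-- ===== SOURCE A (Python) =====
-- def reduce_peaks(heights, peaks):
--     if len(peaks) == 3:
--         if heights[peaks[0]] > heights[peaks[1]] < heights[peaks[2]]:
--             return peaks[:1] + peaks[2:]
--         else:
--             return peaks
--
--     if len(peaks) < 3:
--         return peaks
--
--     reduced_peaks = [0]
--     increase = heights[0] < heights[1]
--
--     for i in range(1, len(peaks)):
--         if heights[peaks[i - 1]] < heights[peaks[i]]:
--             if increase and heights[reduced_peaks[-1]] > heights[peaks[i]]: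
--                 reduced_peaks[-1] = peaks[i]
--             else:
--                 reduced_peaks.append(peaks[i])
--             increase = True
--         else:
--             if not increase:
--                 reduced_peaks.append(peaks[i - 1])
--             increase = False
--
--     if len(peaks) < len(heights) and not increase:
--         reduced_peaks.append(peaks[-1])
--
--     if len(peaks) > len(reduced_peaks):
--         return reduce_peaks(heights, reduced_peaks)
--     else:
--         return reduced_peaks
-- ===== SOURCE B (Python) =====
-- def reduce_peaks(heights, peaks):
--     # Iterative version: a while-loop fixpoint; each pass folds over adjacent
--     # pairs (zip) instead of indexing with range(1, len(peaks)).
--     while True: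
--         if len(peaks) == 3:
--             if heights[peaks[0]] > heights[peaks[1]] < heights[peaks[2]]:
--                 return [peaks[0], peaks[2]]
--             return peaks
--         if len(peaks) < 3:
--             return peaks
--         reduced = [0]
--         inc = heights[0] < heights[1]
--         for prev, cur in zip(peaks, peaks[1:]):
--             if heights[prev] < heights[cur]:
--                 if inc and heights[reduced[-1]] > heights[cur]:
--                     reduced[-1] = cur
--                 else:
--                     reduced.append(cur)
--                 inc = True
--             else:
--                 if not inc:
--                     reduced.append(prev)
--                 inc = False
--         if len(peaks) < len(heights) and not inc:
--             reduced.append(peaks[-1])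
--         if len(reduced) < len(peaks):
--             peaks = reduced
--         else:
--             return reduced
-- ===== Notes on version B (the rewrite author's own statement) =====
-- stated objective: alternative
-- what changed: Replaces A's tail recursion with an explicit while-loop fixpoint over the current peaks list, and rewrites each filtering pass as a fold over adjacent pairs zip(peaks, peaks[1:]) instead of index arithmetic over range(1, len(peaks)).
import Mathlib
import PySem

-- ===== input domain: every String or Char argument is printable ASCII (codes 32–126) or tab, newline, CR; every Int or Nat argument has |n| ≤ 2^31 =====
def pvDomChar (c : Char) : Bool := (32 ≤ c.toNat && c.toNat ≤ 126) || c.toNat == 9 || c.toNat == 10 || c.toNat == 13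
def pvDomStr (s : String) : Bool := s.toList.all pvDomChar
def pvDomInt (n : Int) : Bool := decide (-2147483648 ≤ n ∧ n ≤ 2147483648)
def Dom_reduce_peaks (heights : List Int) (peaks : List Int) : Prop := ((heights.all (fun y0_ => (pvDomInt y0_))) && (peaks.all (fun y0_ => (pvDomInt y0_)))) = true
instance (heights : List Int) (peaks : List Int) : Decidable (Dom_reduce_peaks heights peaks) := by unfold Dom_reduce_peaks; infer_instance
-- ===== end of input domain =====

-- B replaces A's tail recursion by a while-loop fixpoint whose single pass folds over
-- adjacent pairs (zip) instead of indexing with range(1, len(peaks)); objective: alternative.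

-- ===== PORT A =====
-- heights[x] (possibly negative index); under Pre_ every evaluated access is in range
def pvH (heights : List Int) (x : Int) : Int := PySem.List.pyGetD heights x 0

-- the body of A's for-loop over range(1, len(peaks)), state = (reduced_peaks, increase)
def pvStepA (heights : List Int) (peaks : List Int) (st : List Int × Bool) (i : Int) : List Int × Bool :=
  let red := st.1
  let inc := st.2
  let pprev := PySem.List.pyGetD peaks (i - 1) 0
  let pcur := PySem.List.pyGetD peaks i 0
  if pvH heights pprev < pvH heights pcur then
    (if inc = true ∧ pvH heights (PySem.List.pyGetD red (-1) 0) > pvH heights pcur then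
       red.dropLast ++ [pcur]        -- reduced_peaks[-1] = peaks[i]
     else red ++ [pcur], true)
  else
    (if inc = false then red ++ [pprev] else red, false)

def reduce_peaks (heights : List Int) (peaks : List Int) : List Int :=
  if peaks.length = 3 then
    if pvH heights (PySem.List.pyGetD peaks 0 0) > pvH heights (PySem.List.pyGetD peaks 1 0) ∧
       pvH heights (PySem.List.pyGetD peaks 1 0) < pvH heights (PySem.List.pyGetD peaks 2 0) then
      PySem.List.slice peaks none (some 1) ++ PySem.List.slice peaks (some 2) none
    else peaks
  else if peaks.length < 3 then peaks
  else
    let st := (PySem.List.pyRange 1 peaks.length 1).foldl (pvStepA heights peaks)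
      ([0], decide (PySem.List.pyGetD heights 0 0 < PySem.List.pyGetD heights 1 0))
    let red := if (peaks.length : Int) < heights.length ∧ st.2 = false then
        st.1 ++ [PySem.List.pyGetD peaks (-1) 0]
      else st.1
    if red.length < peaks.length then reduce_peaks heights red else red
termination_by peaks.length
decreasing_by omega

-- ===== PORT B =====
-- the body of B's for-loop over zip(peaks, peaks[1:])
def pvStepB (heights : List Int) (st : List Int × Bool) (pc : Int × Int) : List Int × Bool :=
  let red := st.1
  let inc := st.2
  if pvH heights pc.1 < pvH heights pc.2 then
    (if inc = true ∧ pvH heights (PySem.List.pyGetD red (-1) 0) > pvH heights pc.2 then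
       red.dropLast ++ [pc.2]
     else red ++ [pc.2], true)
  else
    (if inc = false then red ++ [pc.1] else red, false)

-- one filtering pass of B
def pvPassB (heights : List Int) (peaks : List Int) : List Int :=
  let st := (peaks.zip peaks.tail).foldl (pvStepB heights)
    ([0], decide (PySem.List.pyGetD heights 0 0 < PySem.List.pyGetD heights 1 0))
  if (peaks.length : Int) < heights.length ∧ st.2 = false then
    st.1 ++ [PySem.List.pyGetD peaks (-1) 0]
  else st.1

-- B's 'while True' loop; the fuel only makes it total in Lean: each continuing
-- iteration strictly shrinks peaks, so fuel = peaks.length + 1 is never exhausted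
def pvLoopB (heights : List Int) : Nat → List Int → List Int
  | 0, peaks => peaks
  | fuel + 1, peaks =>
    if peaks.length = 3 then
      if pvH heights (PySem.List.pyGetD peaks 0 0) > pvH heights (PySem.List.pyGetD peaks 1 0) ∧
         pvH heights (PySem.List.pyGetD peaks 1 0) < pvH heights (PySem.List.pyGetD peaks 2 0) then
        [PySem.List.pyGetD peaks 0 0, PySem.List.pyGetD peaks 2 0]
      else peaks
    else if peaks.length < 3 then peaks
    else
      let red := pvPassB heights peaks
      if red.length < peaks.length then pvLoopB heights fuel red else red

def reduce_peaks_alt (heights : List Int) (peaks : List Int) : List Int :=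
  pvLoopB heights (peaks.length + 1) peaks

-- ===== PRECONDITION & SPEC =====
-- Pre_ excludes exactly the inputs on which Python A raises IndexError: a peak index
-- out of range for heights (for len(peaks)==3 only the indices the short-circuiting
-- chained comparison actually evaluates), or heights shorter than 2 when len(peaks)>3.
def Pre_reduce_peaks (heights : List Int) (peaks : List Int) : Prop :=
  peaks.length < 3 ∨
  (peaks.length = 3 ∧
    PySem.Raise.InRange heights.length (PySem.List.pyGetD peaks 0 0) ∧
    PySem.Raise.InRange heights.length (PySem.List.pyGetD peaks 1 0) ∧
    (PySem.List.pyGetD heights (PySem.List.pyGetD peaks 0 0) 0 >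
       PySem.List.pyGetD heights (PySem.List.pyGetD peaks 1 0) 0 →
     PySem.Raise.InRange heights.length (PySem.List.pyGetD peaks 2 0))) ∨
  (4 ≤ peaks.length ∧ 2 ≤ heights.length ∧
    ∀ p ∈ peaks, PySem.Raise.InRange heights.length p)
instance (heights : List Int) (peaks : List Int) : Decidable (Pre_reduce_peaks heights peaks) := by
  unfold Pre_reduce_peaks; infer_instance
def pvWitness_reduce_peaks : List Int × List Int := ([1, 3, 2, 4, 1], [0, 1, 2, 3, 4])
def Spec_reduce_peaks (heights : List Int) (peaks : List Int) (out : List Int) : Prop := out = reduce_peaks_alt heights peaks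
instance (heights : List Int) (peaks : List Int) (out : List Int) : Decidable (Spec_reduce_peaks heights peaks out) := by unfold Spec_reduce_peaks; infer_instance

-- ===== CLAIM (what is proved, stated in full; the proofs are below) =====
def Claim_equal_reduce_peaks : Prop := ∀ (heights : List Int) (peaks : List Int), Dom_reduce_peaks heights peaks → Pre_reduce_peaks heights peaks → Spec_reduce_peaks heights peaks (reduce_peaks heights peaks)

-- ===== LEMMAS AND PROOFS =====

-- the indexed fold of A's pass equals the zip fold of B's pass
theorem pvFold_range_eq_zip (heights : List Int) :
    ∀ (xs : List Int) (s : List Int × Bool),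
      (List.range (xs.length - 1)).foldl
        (fun st k => pvStepB heights st (xs.getD k 0, xs.getD (k + 1) 0)) s
      = (xs.zip xs.tail).foldl (pvStepB heights) s := by
  intro xs
  induction xs with
  | nil => intro s; simp
  | cons a t ih =>
    intro s
    cases t with
    | nil => simp
    | cons b u =>
      simp only [List.length_cons, Nat.add_sub_cancel, List.range_succ_eq_map,
        List.foldl_cons, List.foldl_map, List.zip_cons_cons, List.tail_cons]
      have hf : (fun (x : List Int × Bool) (y : Nat) =>
            pvStepB heights x ((a :: b :: u).getD y.succ 0, (a :: b :: u).getD (y.succ + 1) 0))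
          = (fun st k => pvStepB heights st ((b :: u).getD k 0, (b :: u).getD (k + 1) 0)) := by
        funext st k
        simp
      have := ih (pvStepB heights s (a, b))
      simp only [List.length_cons, Nat.add_sub_cancel, List.tail_cons] at this
      simpa [hf, List.getD_cons_zero, List.getD_cons_succ] using this

theorem pvStepA_eq (heights : List Int) (xs : List Int) (st : List Int × Bool) (k : Nat) :
    pvStepA heights xs st (1 + (k : Int)) = pvStepB heights st (xs.getD k 0, xs.getD (k + 1) 0) := by
  unfold pvStepA pvStepB
  have h1 : (1 : Int) + (k : Int) - 1 = ((k : Nat) : Int) := by omega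
  have h2 : (1 : Int) + (k : Int) = (((k + 1 : Nat)) : Int) := by push_cast; omega
  rw [h1, h2]
  simp only [PySem.List.pyGetD_natCast]

-- the two passes agree
theorem pvPass_eq (heights : List Int) (peaks : List Int) :
    (let st := (PySem.List.pyRange 1 peaks.length 1).foldl (pvStepA heights peaks)
        ([0], decide (PySem.List.pyGetD heights 0 0 < PySem.List.pyGetD heights 1 0))
     if (peaks.length : Int) < heights.length ∧ st.2 = false then
        st.1 ++ [PySem.List.pyGetD peaks (-1) 0]
      else st.1)
    = pvPassB heights peaks := by
  unfold pvPassB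
  have hfold :
      (PySem.List.pyRange 1 peaks.length 1).foldl (pvStepA heights peaks)
        ([0], decide (PySem.List.pyGetD heights 0 0 < PySem.List.pyGetD heights 1 0))
      = (peaks.zip peaks.tail).foldl (pvStepB heights)
        ([0], decide (PySem.List.pyGetD heights 0 0 < PySem.List.pyGetD heights 1 0)) := by
    rw [PySem.List.pyRange_one, List.foldl_map]
    have hc : ((peaks.length : Int) - 1).toNat = peaks.length - 1 := by omega
    rw [hc, ← pvFold_range_eq_zip heights peaks]
    apply PySem.List.foldl_congr_mem
    intro st k _
    exact pvStepA_eq heights peaks st k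
  simp only [hfold]

-- a length-3 list destructured
theorem pvLen3 (peaks : List Int) (h : peaks.length = 3) :
    ∃ a b c : Int, peaks = [a, b, c] := by
  match peaks, h with
  | [a, b, c], _ => exact ⟨a, b, c, rfl⟩

-- the loop with enough fuel computes A's recursion
theorem pvLoopB_eq (heights : List Int) :
    ∀ (fuel : Nat) (peaks : List Int), peaks.length < fuel →
      pvLoopB heights fuel peaks = reduce_peaks heights peaks := by
  intro fuel
  induction fuel with
  | zero => intro peaks h; omega
  | succ n ih =>
    intro peaks h
    rw [pvLoopB, reduce_peaks]
    by_cases h3 : peaks.length = 3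
    · obtain ⟨a, b, c, rfl⟩ := pvLen3 peaks h3
      have e0 : PySem.List.pyGetD [a, b, c] (0 : Int) 0 = a := rfl
      have e1 : PySem.List.pyGetD [a, b, c] (1 : Int) 0 = b := rfl
      have e2 : PySem.List.pyGetD [a, b, c] (2 : Int) 0 = c := rfl
      have es : PySem.List.slice [a, b, c] none (some 1) ++ PySem.List.slice [a, b, c] (some 2) none
          = [a, c] := rfl
      simp only [h3, if_true, e0, e1, e2, es]
    · simp only [h3, if_false]
      by_cases hlt : peaks.length < 3
      · simp [hlt]
      · simp only [hlt, if_false]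
        rw [pvPass_eq heights peaks]
        by_cases hrec : (pvPassB heights peaks).length < peaks.length
        · simp only [hrec, if_true]
          exact ih (pvPassB heights peaks) (by omega)
        · simp [hrec]

-- ===== VERDICT (by name: the statement is the Claim_ definition above) =====
theorem reduce_peaks_spec : Claim_equal_reduce_peaks := by
  intro heights peaks _ _
  unfold Spec_reduce_peaks reduce_peaks_alt
  exact (pvLoopB_eq heights (peaks.length + 1) peaks (by omega)).symm
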